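-- pv_equiv track=rewrite | github.com/dmt-zh/Python-coding | text_matching/text_matching_script.py | __paste_string
-- ===== SOURCE A (Python) =====
-- from string import Template
--
-- def __paste_string(all_words, diff_words, color):
--     sentence = ''
--     punctuation, stop_marks = ',:;"\'«»', '.!?'
--     t = Template("<span style='background-color:$color'>$cur_str</span>")
--
--     if len(all_words) >= 2:
--         for idx in range(len(all_words) - 1):
--             cur_str = all_words[idx]
--             next_str = all_words[idx + 1]
--
--             if cur_str in diff_words:
--                 if next_str in punctuation or next_str in stop_marks:
--                     sentence += t.substitute(color=color, cur_str=cur_str)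
--                 else:
--                     sentence += t.substitute(color=color, cur_str=cur_str + ' ')
--             else:
--                 if next_str in punctuation or next_str in stop_marks:
--                     sentence += cur_str
--                 else:
--                     sentence += cur_str + ' '
--
--         last = all_words[-1]
--         if last in diff_words:
--             sentence += t.substitute(color=color, cur_str=last)
--         else:
--             sentence += last
--
--     elif len(all_words) == 1:
--         word = all_words[0]
--         if word in diff_words:
--             sentence += t.substitute(color=color, cur_str=word)
--         else:
--             sentence += word
--     else:
--         return sentence
--     return sentence
-- ===== SOURCE B (Python) =====
-- from string import Template
--
-- def __paste_string(all_words, diff_words, color):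
--     punctuation, stop_marks = ',:;"\'«»', '.!?'
--     t = Template("<span style='background-color:$color'>$cur_str</span>")
--     pieces = []
--     sep = ''
--     for word in reversed(all_words):
--         chunk = word + sep
--         if word in diff_words:
--             chunk = t.substitute(color=color, cur_str=chunk)
--         pieces.append(chunk)
--         sep = '' if (word in punctuation or word in stop_marks) else ' '
--     return ''.join(reversed(pieces))
-- ===== Notes on version B (the rewrite author's own statement) =====
-- stated objective: alternative
-- what changed: Replaces A's forward indexed loop with lookahead (all_words[idx+1]) and three length cases by a single reverse traversal that carries the separator decided by the word just processed, collecting chunks back-to-front and joining them reversed; no indexing and no length dispatch remain.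
import Mathlib
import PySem

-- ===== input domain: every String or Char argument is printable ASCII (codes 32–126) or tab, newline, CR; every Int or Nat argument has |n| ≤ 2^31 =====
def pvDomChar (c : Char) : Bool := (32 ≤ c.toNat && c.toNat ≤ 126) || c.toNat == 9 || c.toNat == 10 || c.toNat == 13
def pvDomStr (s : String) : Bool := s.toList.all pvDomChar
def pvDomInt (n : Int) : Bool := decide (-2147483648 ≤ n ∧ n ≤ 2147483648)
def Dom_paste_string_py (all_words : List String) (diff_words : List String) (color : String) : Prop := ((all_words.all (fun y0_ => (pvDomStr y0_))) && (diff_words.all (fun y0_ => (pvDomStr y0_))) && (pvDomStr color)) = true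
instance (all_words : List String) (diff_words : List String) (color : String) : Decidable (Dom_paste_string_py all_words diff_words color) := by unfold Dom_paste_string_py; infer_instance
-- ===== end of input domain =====

-- B replaces A's forward indexed loop with lookahead and three length cases by one reverse
-- traversal carrying the separator, collecting chunks back-to-front and joining them (objective: alternative).


-- shared helpers: Python string concatenation and the Template substitution
-- (t.substitute(color=c, cur_str=s) is plain interpolation, exact as concatenation)
def pvCat (a b : String) : String := String.ofList (a.toList ++ b.toList)

def pvTpl (color cur : String) : String :=
  pvCat (pvCat (pvCat (pvCat "<span style='background-color:" color) "'>") cur) "</span>"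

-- ===== PORT A =====
def paste_string_py (all_words : List String) (diff_words : List String) (color : String) : String :=
  let punctuation := ",:;\"'«»"
  let stop_marks := ".!?"
  if 2 ≤ all_words.length then
    let sentence :=
      (PySem.List.pyRange 0 ((all_words.length : Int) - 1)).foldl (fun sentence idx =>
        let cur_str := PySem.List.pyGetD all_words idx ""
        let next_str := PySem.List.pyGetD all_words (idx + 1) ""
        if diff_words.contains cur_str then
          if PySem.Str.isIn next_str punctuation || PySem.Str.isIn next_str stop_marks then
            pvCat sentence (pvTpl color cur_str)
          else
            pvCat sentence (pvTpl color (pvCat cur_str " "))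
        else
          if PySem.Str.isIn next_str punctuation || PySem.Str.isIn next_str stop_marks then
            pvCat sentence cur_str
          else
            pvCat sentence (pvCat cur_str " "))
        ""
    let last := PySem.List.pyGetD all_words (-1) ""
    if diff_words.contains last then pvCat sentence (pvTpl color last)
    else pvCat sentence last
  else if all_words.length == 1 then
    let word := PySem.List.pyGetD all_words 0 ""
    if diff_words.contains word then pvCat "" (pvTpl color word) else pvCat "" word
  else ""

-- ===== PORT B =====
def paste_string_py_alt (all_words : List String) (diff_words : List String) (color : String) : String :=
  let punctuation := ",:;\"'«»"
  let stop_marks := ".!?"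
  let r := all_words.reverse.foldl (fun (st : List String × String) word =>
      let chunk := pvCat word st.2
      let chunk := if diff_words.contains word then pvTpl color chunk else chunk
      (st.1 ++ [chunk],
       if PySem.Str.isIn word punctuation || PySem.Str.isIn word stop_marks then "" else " "))
    ([], "")
  PySem.Str.join "" r.1.reverse

-- ===== PRECONDITION & SPEC =====
def Spec_paste_string_py (all_words : List String) (diff_words : List String) (color : String) (out : String) : Prop := out = paste_string_py_alt all_words diff_words color
instance (all_words : List String) (diff_words : List String) (color : String) (out : String) : Decidable (Spec_paste_string_py all_words diff_words color out) := by unfold Spec_paste_string_py; infer_instance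

-- ===== CLAIM (what is proved, stated in full; the proofs are below) =====
def Claim_equal_paste_string_py : Prop := ∀ (all_words : List String) (diff_words : List String) (color : String), Dom_paste_string_py all_words diff_words color → Spec_paste_string_py all_words diff_words color (paste_string_py all_words diff_words color)

-- ===== LEMMAS AND PROOFS =====

theorem pvCat_toList (a b : String) : (pvCat a b).toList = a.toList ++ b.toList := by
  simp [pvCat]

theorem pvToList_empty : ("" : String).toList = [] := rfl

theorem pvCat_empty_right (a : String) : pvCat a "" = a := by
  simp [pvCat]

theorem ext_toList {s t : String} (h : s.toList = t.toList) : s = t :=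
  String.toList_inj.mp h

-- a string-accumulating '+=' loop, seen on the char-list side
theorem foldl_pvCat_toList {α : Type} (F : α → String) (l : List α) (s0 : String) :
    (l.foldl (fun s x => pvCat s (F x)) s0).toList
      = s0.toList ++ l.flatMap (fun x => (F x).toList) := by
  induction l generalizing s0 with
  | nil => simp
  | cons x xs ih => simp [List.foldl_cons, ih, pvCat_toList]

-- proof-only helpers: separator carried by B, the wrapped chunk, B's result as structural recursion
def pvSep (w : String) : String :=
  if PySem.Str.isIn w ",:;\"'«»" || PySem.Str.isIn w ".!?" then "" else " "

def pvWrap (dw : List String) (c w sep : String) : String :=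
  if dw.contains w then pvTpl c (pvCat w sep) else pvCat w sep

def pvCL (dw : List String) (c : String) : List String → List String
  | [] => []
  | [w] => [pvWrap dw c w ""]
  | w :: x :: rest => pvWrap dw c w (pvSep x) :: pvCL dw c (x :: rest)

def pvSepHead : List String → String
  | [] => ""
  | x :: _ => pvSep x

-- B's reverse fold collects the chunk list back-to-front, with the carried separator
theorem alt_invariant (dw : List String) (c : String) (l : List String) :
    l.reverse.foldl (fun (st : List String × String) word =>
        let chunk := pvCat word st.2
        let chunk := if dw.contains word then pvTpl c chunk else chunk
        (st.1 ++ [chunk],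
         if PySem.Str.isIn word ",:;\"'«»" || PySem.Str.isIn word ".!?" then "" else " "))
      ([], "")
      = ((pvCL dw c l).reverse, pvSepHead l) := by
  induction l with
  | nil => simp [pvCL, pvSepHead]
  | cons w rest ih =>
    rw [List.reverse_cons, List.foldl_append, ih]
    match rest with
    | [] => simp [pvCL, pvSepHead, pvWrap, pvSep, pvCat_empty_right]
    | x :: rs => simp [pvCL, pvSepHead, pvWrap, pvSep]

theorem alt_eq_pvCL (aw dw : List String) (c : String) :
    paste_string_py_alt aw dw c = PySem.Str.join "" (pvCL dw c aw) := by
  simp only [paste_string_py_alt]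
  rw [alt_invariant]
  simp

-- ''.join = flatten on the char-list side
theorem join_empty_sep (parts : List (List Char)) :
    PySem.Chars.join [] parts = parts.flatten := by
  match parts with
  | [] => simp [PySem.Chars.join_nil]
  | [p] => simp [PySem.Chars.join_singleton]
  | p :: q :: rest =>
    rw [PySem.Chars.join_cons_cons]
    simpa using congrArg (fun l => p ++ l) (join_empty_sep (q :: rest))

theorem join_pvCL_toList (dw : List String) (c : String) (l : List String) :
    (PySem.Str.join "" (pvCL dw c l)).toList
      = ((pvCL dw c l).map String.toList).flatten := by
  rw [PySem.Str.toList_join, show ("" : String).toList = [] from rfl, join_empty_sep]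

-- proof-only helper: A's chunk for index idx (the loop body's appended piece)
def pvChunkA (all_words diff_words : List String) (color : String) (idx : Int) : String :=
  let cur := PySem.List.pyGetD all_words idx ""
  let nxt := PySem.List.pyGetD all_words (idx + 1) ""
  let p := PySem.Str.isIn nxt ",:;\"'«»" || PySem.Str.isIn nxt ".!?"
  if diff_words.contains cur then
    if p then pvTpl color cur else pvTpl color (pvCat cur " ")
  else
    if p then cur else pvCat cur " "

theorem chunkA_eq_wrap (l dw : List String) (c : String) (i : Int)
    (h0 : 0 ≤ i) (h1 : i < (l.length : Int) - 1) :
    pvChunkA l dw c i = pvWrap dw c (l[i.toNat]'(by omega)) (pvSep (l[i.toNat + 1]'(by omega))) := by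
  have hc : PySem.List.pyGetD l i "" = l[i.toNat]'(by omega) :=
    PySem.List.pyGetD_eq_getElem l "" h0 (by omega)
  have hn : PySem.List.pyGetD l (i + 1) "" = l[i.toNat + 1]'(by omega) := by
    have := PySem.List.pyGetD_eq_getElem l (i := i + 1) "" (by omega) (by omega)
    simpa [show (i + 1).toNat = i.toNat + 1 by omega] using this
  simp only [pvChunkA, pvWrap, pvSep, hc, hn]
  split_ifs <;> simp [pvCat_empty_right]

-- the chunk list flattens to: chunks at adjacent pairs, then the bare last word
theorem pvCL_flatten (dw : List String) (c : String) (l : List String) (h : l ≠ []) :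
    ((pvCL dw c l).map String.toList).flatten
      = ((l.zip l.tail).flatMap (fun p => (pvWrap dw c p.1 (pvSep p.2)).toList))
        ++ (pvWrap dw c (l.getLast h) "").toList := by
  match l with
  | [w] => simp [pvCL]
  | w :: x :: rest =>
    have ih := pvCL_flatten dw c (x :: rest) (by simp)
    simp only [pvCL, List.map_cons, List.flatten_cons, ih, List.zip_cons_cons, List.tail_cons,
      List.flatMap_cons, List.getLast_cons (by simp : (x :: rest : List String) ≠ [])]
    simp [List.append_assoc]

-- A's indexed chunk list IS the adjacent-pair chunk list
theorem range_map_eq_zip (l dw : List String) (c : String) :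
    (PySem.List.pyRange 0 ((l.length : Int) - 1)).map (fun i => (pvChunkA l dw c i).toList)
      = (l.zip l.tail).map (fun p => (pvWrap dw c p.1 (pvSep p.2)).toList) := by
  apply List.ext_getElem
  · simp [PySem.List.length_pyRange_one, List.length_zip]
  · intro k hk1 hk2
    have hkl : k < l.length - 1 := by
      simp [PySem.List.length_pyRange_one] at hk1; omega
    simp only [List.getElem_map]
    rw [PySem.List.getElem_pyRange_one]
    rw [show (0 : Int) + (k : Int) = (k : Int) by omega]
    rw [chunkA_eq_wrap l dw c (k : Int) (by omega) (by omega)]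
    have hzip : (l.zip l.tail)[k]'(by simpa using hk2) = (l[k]'(by omega), l[k+1]'(by omega)) := by
      rw [List.getElem_zip]
      congr 1
      rw [List.getElem_tail]
    rw [hzip]
    simp [show ((k : Int)).toNat = k by omega]

theorem paste_A_cons (w x : String) (rest : List String) (dw : List String) (c : String) :
    paste_string_py (w :: x :: rest) dw c = paste_string_py_alt (w :: x :: rest) dw c := by
  rw [alt_eq_pvCL]
  have hlen : 2 ≤ (w :: x :: rest).length := by simp
  have hne : (w :: x :: rest) ≠ [] := by simp
  apply ext_toList
  have hbody : (fun (sentence : String) (idx : Int) =>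
      let cur_str := PySem.List.pyGetD (w :: x :: rest) idx ""
      let next_str := PySem.List.pyGetD (w :: x :: rest) (idx + 1) ""
      if dw.contains cur_str then
        if PySem.Str.isIn next_str ",:;\"'«»" || PySem.Str.isIn next_str ".!?" then
          pvCat sentence (pvTpl c cur_str)
        else
          pvCat sentence (pvTpl c (pvCat cur_str " "))
      else
        if PySem.Str.isIn next_str ",:;\"'«»" || PySem.Str.isIn next_str ".!?" then
          pvCat sentence cur_str
        else
          pvCat sentence (pvCat cur_str " "))
      = (fun sentence idx => pvCat sentence (pvChunkA (w :: x :: rest) dw c idx)) := by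
    funext s i
    simp only [pvChunkA]
    split_ifs <;> rfl
  have hlast : PySem.List.pyGetD (w :: x :: rest) (-1) "" = (w :: x :: rest).getLast hne :=
    PySem.List.pyGetD_neg_one _ "" hne
  simp only [paste_string_py, if_pos hlen, hbody, hlast]
  split_ifs with hcon
  · rw [pvCat_toList, foldl_pvCat_toList, join_pvCL_toList, pvCL_flatten dw c _ hne]
    simp only [pvToList_empty, List.nil_append]
    refine congrArg₂ (· ++ ·) ?_ ?_
    · rw [List.flatMap_def, range_map_eq_zip, ← List.flatMap_def]
    · simp only [List.contains_eq_mem, decide_eq_true_eq] at hcon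
      have hcon2 : (x :: rest).getLast (by simp) ∈ dw := hcon
      simp [pvWrap, pvCat_empty_right, hcon2]
  · rw [pvCat_toList, foldl_pvCat_toList, join_pvCL_toList, pvCL_flatten dw c _ hne]
    simp only [pvToList_empty, List.nil_append]
    refine congrArg₂ (· ++ ·) ?_ ?_
    · rw [List.flatMap_def, range_map_eq_zip, ← List.flatMap_def]
    · simp only [List.contains_eq_mem, decide_eq_true_eq] at hcon
      have hcon2 : ¬ ((x :: rest).getLast (by simp) ∈ dw) := hcon
      simp [pvWrap, pvCat_empty_right, hcon2]

-- ===== VERDICT (by name: the statement is the Claim_ definition above) =====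
theorem paste_string_py_spec : Claim_equal_paste_string_py := by
  intro aw dw c _
  unfold Spec_paste_string_py
  match aw with
  | [] =>
    rw [alt_eq_pvCL]
    apply ext_toList
    rw [join_pvCL_toList]
    simp [paste_string_py, pvCL]
  | [w] =>
    rw [alt_eq_pvCL]
    apply ext_toList
    rw [join_pvCL_toList]
    simp only [paste_string_py, pvCL]
    by_cases hw : w ∈ dw <;>
      simp [hw, pvWrap, pvCat_empty_right, PySem.List.pyGetD_zero_cons, pvCat_toList]
  | w :: x :: rest => exact paste_A_cons w x rest dw c
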